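-- pv_equiv track=rewrite | github.com/dnwls16071/Everyday-Algorithm | 프로그래머스/3/64062. 징검다리 건너기/징검다리 건너기.py | moving_check
-- ===== SOURCE A (Python) =====
-- def moving_check(n, stones, k):
--     skip = 0    # 최대 건너뛸 수 있는 칸의 수가 k보다 크면 건너뛸 수 없어 결국 종료
--     for stone in stones:
--         if stone < n:
--             skip += 1
--             if skip >= k:
--                 return False
--         else:
--             skip = 0
--     return True
-- ===== SOURCE B (Python) =====
-- def moving_check(n, stones, k):
--     # Gap view: the longest stretch of stones below n equals the largest gap
--     # between consecutive indices of stones at height >= n, with virtual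
--     # boundary indices -1 and len(stones) just outside the array.
--     bounds = [-1] + [i for i, s in enumerate(stones) if s >= n] + [len(stones)]
--     longest = 0
--     for a, b in zip(bounds, bounds[1:]):
--         longest = max(longest, b - a - 1)
--     return longest < k
-- ===== Notes on version B (the rewrite author's own statement) =====
-- stated objective: alternative
-- what changed: Replaces A's running skip counter with scan-reset and early return by an index-gap formulation: collect the indices of stones at height >= n (with virtual boundaries -1 and len), take the largest gap between consecutive indices, and compare it to k once at the end.
-- intended difference: For k <= 0 when every stone is at height >= n (including empty stones), A returns True because its k-check only runs after seeing a low stone, while B returns False since the longest low stretch (0) is already not below k; B's uniform comparison is the intended reading and k <= 0 is outside the problem's natural domain. — e.g. on moving_check(0, ([], 0)): A returns true, B returns false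
import Mathlib
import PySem

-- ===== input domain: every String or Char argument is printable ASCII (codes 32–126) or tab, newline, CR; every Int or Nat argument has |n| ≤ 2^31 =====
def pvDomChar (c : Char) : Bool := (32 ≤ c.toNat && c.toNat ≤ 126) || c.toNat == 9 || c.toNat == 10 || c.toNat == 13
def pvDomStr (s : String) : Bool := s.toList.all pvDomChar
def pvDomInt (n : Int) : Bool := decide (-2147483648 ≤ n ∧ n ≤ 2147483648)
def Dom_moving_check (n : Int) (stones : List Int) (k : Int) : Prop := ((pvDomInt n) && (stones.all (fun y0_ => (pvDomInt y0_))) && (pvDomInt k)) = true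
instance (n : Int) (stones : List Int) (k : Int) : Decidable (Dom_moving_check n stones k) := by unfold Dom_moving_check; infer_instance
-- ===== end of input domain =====

-- B replaces A's running skip counter with an index-gap formulation (largest
-- gap between consecutive indices of high stones); alternative algorithm, same cost.


-- ===== PORT A =====
-- A's for-loop with early return, as structural recursion over stones
-- carrying the running skip counter.
def movingLoopA (n k : Int) : List Int → Int → Bool
  | [], _ => true
  | stone :: rest, skip =>
    if stone < n then
      let skip' := skip + 1
      if skip' ≥ k then false else movingLoopA n k rest skip'
    else movingLoopA n k rest 0

def moving_check (n : Int) (stones : List Int) (k : Int) : Bool :=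
  movingLoopA n k stones 0

-- ===== PORT B =====
-- B's code: bounds = [-1] + [i for i, s in enumerate(stones) if s >= n] + [len(stones)];
-- then a loop over zip(bounds, bounds[1:]) maximising b - a - 1, and one comparison.
def moving_check_alt (n : Int) (stones : List Int) (k : Int) : Bool :=
  let bounds : List Int :=
    -1 :: (((stones.zipIdx).filter (fun p => decide (n ≤ p.1))).map (fun p => ((p.2 : Int)))) ++ [(stones.length : Int)]
  let longest : Int :=
    (bounds.zip bounds.tail).foldl (fun acc p => max acc (p.2 - p.1 - 1)) 0
  decide (longest < k)

-- ===== PRECONDITION & SPEC =====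
-- For k <= 0 when every stone is at height >= n (including empty stones), A returns True
-- because its k-check only runs after seeing a low stone, while B returns False since the
-- longest low stretch (0) is already not below k; B's uniform comparison is the intended
-- reading and k <= 0 is outside the problem's natural domain.
def D_moving_check (n : Int) (stones : List Int) (k : Int) : Prop :=
  k ≤ 0 ∧ ∀ s ∈ stones, n ≤ s
instance (n : Int) (stones : List Int) (k : Int) : Decidable (D_moving_check n stones k) := by unfold D_moving_check; infer_instance

def Spec_moving_check (n : Int) (stones : List Int) (k : Int) (out : Bool) : Prop := ¬ D_moving_check n stones k → out = moving_check_alt n stones k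
instance (n : Int) (stones : List Int) (k : Int) (out : Bool) : Decidable (Spec_moving_check n stones k out) := by unfold Spec_moving_check; infer_instance

def pvDiffWitness_moving_check : Int × List Int × Int := (0, ([], 0))
def pvDiffWitnessOut_moving_check : Bool × Bool := (true, false)

-- ===== CLAIM (what is proved, stated in full; the proofs are below) =====
def Claim_unchanged_moving_check : Prop := ∀ (n : Int) (stones : List Int) (k : Int), Dom_moving_check n stones k → Spec_moving_check n stones k (moving_check n stones k)
def Claim_changed_moving_check : Prop := Dom_moving_check (pvDiffWitness_moving_check.1) (pvDiffWitness_moving_check.2.1) (pvDiffWitness_moving_check.2.2) ∧ D_moving_check (pvDiffWitness_moving_check.1) (pvDiffWitness_moving_check.2.1) (pvDiffWitness_moving_check.2.2) ∧ moving_check (pvDiffWitness_moving_check.1) (pvDiffWitness_moving_check.2.1) (pvDiffWitness_moving_check.2.2) = pvDiffWitnessOut_moving_check.1 ∧ moving_check_alt (pvDiffWitness_moving_check.1) (pvDiffWitness_moving_check.2.1) (pvDiffWitness_moving_check.2.2) = pvDiffWitnessOut_moving_check.2 ∧ pvDiffWitnessOut_moving_check.1 ≠ pvDiffWitnessOut_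moving_check.2
def Claim_exact_moving_check : Prop := ∀ (n : Int) (stones : List Int) (k : Int), Dom_moving_check n stones k → D_moving_check n stones k → moving_check n stones k ≠ moving_check_alt n stones k

-- ===== LEMMAS AND PROOFS =====

-- Reference scan (proof device only): runFold n l = (leading low-run length, max low-run length).
def runFold (n : Int) (stones : List Int) : Int × Int :=
  stones.foldr
    (fun s acc =>
      let pre := if s < n then acc.1 + 1 else 0
      (pre, if pre > acc.2 then pre else acc.2)) (0, 0)

theorem runFold_cons (n s : Int) (rest : List Int) :
    runFold n (s :: rest) =
      ((if s < n then (runFold n rest).1 + 1 else 0),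
       if (if s < n then (runFold n rest).1 + 1 else 0) > (runFold n rest).2
       then (if s < n then (runFold n rest).1 + 1 else 0)
       else (runFold n rest).2) := by
  simp [runFold]

theorem runFold_bounds (n : Int) (stones : List Int) :
    0 ≤ (runFold n stones).1 ∧ (runFold n stones).1 ≤ (runFold n stones).2 := by
  induction stones with
  | nil => simp [runFold]
  | cons s rest ih =>
    rw [runFold_cons]
    dsimp only
    split_ifs <;> omega

theorem dec2 {P Q P' Q' : Prop} [Decidable P] [Decidable Q] [Decidable P'] [Decidable Q']
    (h : (P ∧ Q) ↔ (P' ∧ Q')) :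
    (decide P && decide Q) = (decide P' && decide Q') := by
  by_cases hP : P <;> by_cases hQ : Q <;> by_cases hP' : P' <;> by_cases hQ' : Q' <;>
    simp_all

-- A-side invariant: A's loop with counter `skip` decides
-- "skip + low-prefix-run < max k 1 and max low-run < max k 1".
theorem loopA_eq (n k : Int) (stones : List Int) :
    ∀ skip : Int, 0 ≤ skip → skip < max k 1 →
      movingLoopA n k stones skip =
        (decide (skip + (runFold n stones).1 < max k 1) &&
         decide ((runFold n stones).2 < max k 1)) := by
  induction stones with
  | nil =>
    intro skip h0 hK
    have h1 : skip + (runFold n []).1 < max k 1 := by simp only [runFold, List.foldr_nil]; omega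
    have h2 : (runFold n []).2 < max k 1 := by simp only [runFold, List.foldr_nil]; omega
    simp [movingLoopA, h1, h2]
  | cons s rest ih =>
    intro skip h0 hK
    obtain ⟨hb1, hb2⟩ := runFold_bounds n rest
    rw [runFold_cons]
    by_cases h : s < n
    · simp only [if_pos h]
      simp only [movingLoopA, if_pos h]
      by_cases hk : skip + 1 ≥ k
      · rw [if_pos hk]
        symm
        rw [Bool.and_eq_false_iff]
        left
        rw [decide_eq_false_iff_not]
        omega
      · rw [if_neg hk, ih (skip + 1) (by omega) (by omega)]
        split_ifs with hab <;> exact dec2 (by omega)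
    · simp only [if_neg h]
      simp only [movingLoopA, if_neg h]
      rw [ih 0 le_rfl (by omega)]
      rw [if_neg (by omega : ¬ ((0:Int) > (runFold n rest).2))]
      exact dec2 (by omega)

-- B-side: indices (from i) of high stones, and the max-gap value of the bounds list.
def highsFrom (n : Int) (i : Nat) (l : List Int) : List Int :=
  ((l.zipIdx i).filter (fun p => decide (n ≤ p.1))).map (fun p => ((p.2 : Int)))

def gmax (n : Int) (prev : Int) (i : Nat) : List Int → Int
  | [] => (i : Int) - prev - 1
  | s :: rest =>
    if n ≤ s then max ((i : Int) - prev - 1) (gmax n (i : Int) (i + 1) rest)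
    else gmax n prev (i + 1) rest

theorem highsFrom_nil (n : Int) (i : Nat) : highsFrom n i [] = [] := by
  simp [highsFrom]

theorem highsFrom_cons (n : Int) (i : Nat) (s : Int) (rest : List Int) :
    highsFrom n i (s :: rest) =
      if n ≤ s then ((i : Int) :: highsFrom n (i + 1) rest) else highsFrom n (i + 1) rest := by
  by_cases h : n ≤ s <;> simp [highsFrom, List.zipIdx_cons, h]

-- The fold over zipped bounds computes max acc (gmax …).
theorem fold_gaps (n : Int) : ∀ (l : List Int) (i : Nat) (prev acc : Int),
    ((prev :: (highsFrom n i l ++ [(i : Int) + l.length])).zip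
        (highsFrom n i l ++ [(i : Int) + l.length])).foldl
      (fun a p => max a (p.2 - p.1 - 1)) acc
    = max acc (gmax n prev i l) := by
  intro l
  induction l with
  | nil =>
    intro i prev acc
    simp [highsFrom_nil, gmax, List.zip, List.foldl]
  | cons s rest ih =>
    intro i prev acc
    rw [highsFrom_cons]
    by_cases h : n ≤ s
    · rw [if_pos h]
      have : ((i : Int) + (s :: rest).length) = ((i + 1 : Nat) : Int) + rest.length := by
        push_cast [List.length_cons]; ring
      rw [this]
      simp only [List.cons_append, List.zip_cons_cons, List.foldl_cons]
      rw [ih (i + 1) (i : Int) (max acc ((i : Int) - prev - 1))]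
      simp only [gmax, if_pos h]
      omega
    · rw [if_neg h]
      have : ((i : Int) + (s :: rest).length) = ((i + 1 : Nat) : Int) + rest.length := by
        push_cast [List.length_cons]; ring
      rw [this, ih (i + 1) prev acc]
      simp only [gmax, if_neg h]

theorem gmax_eq_runFold (n : Int) : ∀ (l : List Int) (i : Nat) (prev : Int),
    prev ≤ (i : Int) - 1 →
    gmax n prev i l = max ((i : Int) + (runFold n l).1 - prev - 1) ((runFold n l).2) := by
  intro l
  induction l with
  | nil =>
    intro i prev hp
    simp only [gmax, runFold, List.foldr_nil]
    omega
  | cons s rest ih =>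
    intro i prev hp
    obtain ⟨hb1, hb2⟩ := runFold_bounds n rest
    rw [runFold_cons]
    by_cases h : s < n
    · have hns : ¬ n ≤ s := by omega
      simp only [gmax, if_neg hns, if_pos h]
      rw [ih (i + 1) prev (by push_cast; omega)]
      push_cast
      split_ifs <;> omega
    · have hns : n ≤ s := by omega
      simp only [gmax, if_pos hns, if_neg h]
      rw [ih (i + 1) (i : Int) (by push_cast; omega)]
      push_cast
      split_ifs <;> omega

-- B's port computes decide (maxRun < k).
theorem alt_eq (n : Int) (stones : List Int) (k : Int) :
    moving_check_alt n stones k = decide ((runFold n stones).2 < k) := by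
  obtain ⟨hb1, hb2⟩ := runFold_bounds n stones
  unfold moving_check_alt
  have hlen : ((stones.length : Nat) : Int) = ((0 : Nat) : Int) + stones.length := by simp
  show decide (((((-1:Int) :: (highsFrom n 0 stones ++ [(stones.length : Int)])).zip (((-1:Int) :: (highsFrom n 0 stones ++ [(stones.length : Int)])).tail)).foldl (fun acc p => max acc (p.2 - p.1 - 1)) 0) < k) = decide ((runFold n stones).2 < k)
  simp only [List.tail_cons]
  have hf := fold_gaps n stones 0 (-1) 0
  rw [hlen]
  simp only [hf]
  rw [gmax_eq_runFold n stones 0 (-1) (by norm_num)]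
  have : max (0 : Int) (max (((0 : Nat) : Int) + (runFold n stones).1 - (-1) - 1) ((runFold n stones).2)) = (runFold n stones).2 := by
    push_cast; omega
  rw [this]

-- If some stone is low, the max low-run is at least 1.
theorem runFold_pos_of_low (n : Int) (stones : List Int)
    (h : ∃ s ∈ stones, s < n) : 1 ≤ (runFold n stones).2 := by
  induction stones with
  | nil => simp at h
  | cons s rest ih =>
    obtain ⟨hb1, hb2⟩ := runFold_bounds n rest
    rw [runFold_cons]
    rcases h with ⟨t, ht, htl⟩
    rcases List.mem_cons.1 ht with rfl | hmem
    · simp only [if_pos htl]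
      split_ifs <;> omega
    · have := ih ⟨t, hmem, htl⟩
      split_ifs <;> omega

-- If every stone is high, A's loop returns true and the max low-run is 0.
theorem loopA_allHigh (n k : Int) (stones : List Int)
    (h : ∀ s ∈ stones, n ≤ s) : ∀ skip, movingLoopA n k stones skip = true := by
  induction stones with
  | nil => intro skip; rfl
  | cons s rest ih =>
    intro skip
    have hs : ¬ s < n := by have := h s (List.mem_cons_self); omega
    simp only [movingLoopA, if_neg hs]
    exact ih (fun t ht => h t (List.mem_cons_of_mem _ ht)) 0

theorem runFold_allHigh (n : Int) (stones : List Int)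
    (h : ∀ s ∈ stones, n ≤ s) : runFold n stones = (0, 0) := by
  induction stones with
  | nil => rfl
  | cons s rest ih =>
    have hs : ¬ s < n := by have := h s (List.mem_cons_self); omega
    rw [runFold_cons, ih (fun t ht => h t (List.mem_cons_of_mem _ ht))]
    simp [hs]

-- ===== VERDICT (by name: the statements are the Claim_ definitions above) =====
theorem moving_check_spec : Claim_unchanged_moving_check := by
  intro n stones k _ hnd
  show moving_check n stones k = moving_check_alt n stones k
  obtain ⟨hb1, hb2⟩ := runFold_bounds n stones
  rw [alt_eq, moving_check, loopA_eq n k stones 0 le_rfl (by omega)]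
  by_cases hk : 1 ≤ k
  · have hm : max k 1 = k := by omega
    rw [hm]
    by_cases h2 : (runFold n stones).2 < k
    · rw [decide_eq_true (by omega : (0 : Int) + (runFold n stones).1 < k),
          decide_eq_true h2]
      rfl
    · rw [decide_eq_false h2, Bool.and_false]
  · -- k ≤ 0 and (by ¬D_) some stone is low, so both sides are false
    have hlow : ∃ s ∈ stones, s < n := by
      by_contra hno
      push Not at hno
      exact hnd ⟨by omega, fun s hs => by have := hno s hs; omega⟩
    have h1 := runFold_pos_of_low n stones hlow
    rw [decide_eq_false (by omega : ¬ (runFold n stones).2 < max k 1), Bool.and_false,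
        decide_eq_false (by omega : ¬ (runFold n stones).2 < k)]

theorem moving_check_changed : Claim_changed_moving_check := by
  unfold Claim_changed_moving_check; decide

theorem moving_check_tight : Claim_exact_moving_check := by
  intro n stones k _ hd
  obtain ⟨hk, hall⟩ := hd
  rw [moving_check, loopA_allHigh n k stones hall 0, alt_eq, runFold_allHigh n stones hall]
  have hk0 : ¬ ((0, 0) : Int × Int).2 < k := by show ¬ (0:Int) < k; omega
  rw [decide_eq_false hk0]
  exact Bool.noConfusion
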